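-- pv_equiv track=rewrite | github.com/joaoluis89/kmeans | Desenvolvimento/Codigo/Representation.py | termsList
-- ===== SOURCE A (Python) =====
-- def termsList(corpus = []):
--     terms = []
--     for row in corpus:
--         for col in row:
--             if col not in terms:
--                 terms.append(col)
--     terms.sort()
--     return terms
-- ===== SOURCE B (Python) =====
-- def termsList(corpus = []):
--     flat = [col for row in corpus for col in row]
--     flat.sort()
--     result = []
--     for col in flat:
--         if result and result[-1] == col:
--             continue
--         result.append(col)
--     return result
-- ===== Notes on version B (the rewrite author's own statement) =====
-- stated objective: faster
-- what changed: Replaced the quadratic membership-test accumulation with flatten + one sort + a linear adjacent-duplicate scan (dedup by adjacency after sorting).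
import Mathlib
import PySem

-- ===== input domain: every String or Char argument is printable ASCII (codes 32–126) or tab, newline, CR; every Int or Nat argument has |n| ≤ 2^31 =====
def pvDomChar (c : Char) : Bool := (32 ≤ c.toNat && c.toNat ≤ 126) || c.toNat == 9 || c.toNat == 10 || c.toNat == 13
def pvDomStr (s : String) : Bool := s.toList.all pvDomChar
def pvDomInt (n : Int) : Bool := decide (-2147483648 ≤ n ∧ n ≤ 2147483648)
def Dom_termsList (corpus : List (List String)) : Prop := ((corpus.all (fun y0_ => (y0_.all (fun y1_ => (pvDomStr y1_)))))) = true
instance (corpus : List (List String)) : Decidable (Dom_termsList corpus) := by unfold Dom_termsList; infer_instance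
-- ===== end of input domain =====

-- B replaces A's quadratic membership-test accumulation by flatten + one sort + a
-- linear adjacent-duplicate scan (dedup arises from adjacency after sorting): faster.

-- ===== PORT A =====
def termsList (corpus : List (List String)) : List String :=
  let terms := corpus.foldl (fun terms row =>
    row.foldl (fun terms col => if col ∈ terms then terms else terms ++ [col]) terms) []
  PySem.List.sorted terms (fun x => x) false

-- ===== PORT B =====
-- 'result and result[-1] == col' is ported as 'result.getLast? = some col'
-- (getLast? is none exactly when result is empty, so the guard is exact).
def termsList_alt (corpus : List (List String)) : List String :=
  let flat := corpus.flatMap (fun row => row)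
  let flatS := PySem.List.sorted flat (fun x => x) false
  flatS.foldl (fun result col =>
    if result.getLast? = some col then result else result ++ [col]) []

-- ===== PRECONDITION & SPEC =====
def Spec_termsList (corpus : List (List String)) (out : List String) : Prop := out = termsList_alt corpus
instance (corpus : List (List String)) (out : List String) : Decidable (Spec_termsList corpus out) := by unfold Spec_termsList; infer_instance

-- ===== CLAIM (what is proved, stated in full; the proofs are below) =====
def Claim_equal_termsList : Prop := ∀ (corpus : List (List String)), Dom_termsList corpus → Spec_termsList corpus (termsList corpus)

-- ===== LEMMAS AND PROOFS =====

-- A's accumulation step and B's adjacency step, named for the proofs.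
def aStep (acc : List String) (c : String) : List String :=
  if c ∈ acc then acc else acc ++ [c]

def bStep (acc : List String) (c : String) : List String :=
  if acc.getLast? = some c then acc else acc ++ [c]

-- A's nested loops are one fold of aStep over the flattened corpus.
theorem foldA_flatten (corpus : List (List String)) (init : List String) :
    corpus.foldl (fun terms row => row.foldl aStep terms) init
      = (corpus.flatMap (fun row => row)).foldl aStep init := by
  induction corpus generalizing init with
  | nil => rfl
  | cons r t ih => simp [List.foldl_append, ih]

-- A's fold keeps the accumulator duplicate-free and collects exactly the members.
theorem foldA_invariant (xs : List String) (acc : List String) (hacc : acc.Nodup) :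
    (xs.foldl aStep acc).Nodup ∧ (∀ a, a ∈ xs.foldl aStep acc ↔ a ∈ acc ∨ a ∈ xs) := by
  induction xs generalizing acc with
  | nil => simp [hacc]
  | cons c t ih =>
    simp only [List.foldl_cons, aStep]
    by_cases h : c ∈ acc
    · rw [if_pos h]
      obtain ⟨h1, h2⟩ := ih acc hacc
      refine ⟨h1, fun a => ?_⟩
      rw [h2]
      constructor
      · rintro (ha | ha) <;> simp [ha]
      · rintro (ha | ha)
        · exact Or.inl ha
        · rcases List.mem_cons.1 ha with rfl | ha'
          · exact Or.inl h
          · exact Or.inr ha'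
    · rw [if_neg h]
      have hacc' : (acc ++ [c]).Nodup := by
        rw [List.nodup_append]
        exact ⟨hacc, List.nodup_singleton _, by
          intro a ha b hb
          rw [List.mem_singleton.1 hb]
          rintro rfl
          exact h ha⟩
      obtain ⟨h1, h2⟩ := ih (acc ++ [c]) hacc'
      refine ⟨h1, fun a => ?_⟩
      rw [h2]
      simp [List.mem_append, List.mem_cons]
      tauto

-- In a strictly increasing list every element is at most the last one.
theorem le_getLast_of_pairwise (acc : List String) (a l : String)
    (hp : acc.Pairwise (· < ·)) (ha : a ∈ acc) (hl : acc.getLast? = some l) : a ≤ l := by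
  induction acc with
  | nil => cases ha
  | cons x t ih =>
    cases t with
    | nil =>
      simp at ha hl
      simp [ha, hl]
    | cons y u =>
      rw [List.getLast?_cons_cons] at hl
      rcases List.mem_cons.1 ha with rfl | ha'
      · have hlmem : l ∈ y :: u := List.mem_of_getLast? hl
        exact le_of_lt (List.rel_of_pairwise_cons hp hlmem)
      · exact ih hp.of_cons ha' hl

-- B's adjacency fold over a weakly sorted tail keeps the accumulator strictly
-- increasing and collects exactly the members.
theorem foldB_invariant (xs : List String) (acc : List String)
    (hxs : xs.Pairwise (· ≤ ·)) (hacc : acc.Pairwise (· < ·))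
    (hle : ∀ a ∈ acc, ∀ x ∈ xs, a ≤ x) :
    (xs.foldl bStep acc).Pairwise (· < ·) ∧
      (∀ a, a ∈ xs.foldl bStep acc ↔ a ∈ acc ∨ a ∈ xs) := by
  induction xs generalizing acc with
  | nil => exact ⟨hacc, fun a => by simp⟩
  | cons c t ih =>
    have hct : ∀ x ∈ t, c ≤ x := fun x hx => List.rel_of_pairwise_cons hxs hx
    simp only [List.foldl_cons, bStep]
    by_cases h : acc.getLast? = some c
    · rw [if_pos h]
      have hc : c ∈ acc := List.mem_of_getLast? h
      obtain ⟨h1, h2⟩ := ih acc hxs.of_cons hacc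
        (fun a ha x hx => hle a ha x (List.mem_cons_of_mem c hx))
      refine ⟨h1, fun a => ?_⟩
      rw [h2]
      constructor
      · rintro (ha | ha) <;> simp [ha]
      · rintro (ha | ha)
        · exact Or.inl ha
        · rcases List.mem_cons.1 ha with rfl | ha'
          · exact Or.inl hc
          · exact Or.inr ha'
    · rw [if_neg h]
      have hlt : ∀ a ∈ acc, a < c := by
        intro a ha
        refine lt_of_le_of_ne (hle a ha c (List.mem_cons_self)) ?_
        rintro rfl
        have hne : acc ≠ [] := by rintro rfl; cases ha
        obtain ⟨l, hl⟩ := List.getLast?_isSome.2 hne |> Option.isSome_iff_exists.1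
        have h1 : l ≤ a := hle l (List.mem_of_getLast? hl) a (List.mem_cons_self)
        have h2 : a ≤ l := le_getLast_of_pairwise acc a l hacc ha hl
        exact h (by rw [hl, le_antisymm h1 h2])
      have hacc' : (acc ++ [c]).Pairwise (· < ·) := by
        rw [List.pairwise_append]
        exact ⟨hacc, List.pairwise_singleton _ _, fun a ha b hb => by
          rw [List.mem_singleton.1 hb]; exact hlt a ha⟩
      have hle' : ∀ a ∈ acc ++ [c], ∀ x ∈ t, a ≤ x := by
        intro a ha x hx
        rcases List.mem_append.1 ha with ha' | ha'
        · exact hle a ha' x (List.mem_cons_of_mem c hx)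
        · rw [List.mem_singleton.1 ha']; exact hct x hx
      obtain ⟨h1, h2⟩ := ih (acc ++ [c]) hxs.of_cons hacc' hle'
      refine ⟨h1, fun a => ?_⟩
      rw [h2]
      simp [List.mem_append, List.mem_cons]
      tauto

-- ===== VERDICT (by name: the statement is the Claim_ definition above) =====
theorem termsList_spec : Claim_equal_termsList := by
  intro corpus _
  unfold Spec_termsList termsList termsList_alt
  simp only
  set flat := corpus.flatMap (fun row => row) with hflat
  rw [show (fun (terms : List String) (row : List String) =>
        row.foldl (fun terms col => if col ∈ terms then terms else terms ++ [col]) terms)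
      = (fun terms row => row.foldl aStep terms) from rfl, foldA_flatten]
  obtain ⟨hTnd, hTmem⟩ := foldA_invariant flat [] List.nodup_nil
  set T := flat.foldl aStep [] with hT
  set S := PySem.List.sorted flat (fun x => x) false with hS
  have hSp : S.Pairwise (· ≤ ·) := PySem.List.sorted_pairwise flat (fun x => x)
  obtain ⟨hRp, hRmem⟩ := foldB_invariant S [] hSp (List.Pairwise.nil) (by simp)
  set R := S.foldl bStep [] with hR
  have hRnd : R.Nodup := hRp.imp (fun h => ne_of_lt h)
  have hmem : ∀ a, a ∈ R ↔ a ∈ T := by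
    intro a
    rw [hRmem a, hTmem a]
    simp [PySem.List.mem_sorted, hS]
  have hperm : R.Perm T := (List.perm_ext_iff_of_nodup hRnd hTnd).2 hmem
  exact PySem.List.sorted_eq_of_perm_of_pairwise_lt T R (fun x : String => x) hperm hRp
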